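-- pv_equiv track=rewrite | github.com/BzhangURU/LeetCode-Python-Solutions | LC00719_Find_K-th_Smallest_Pair_Distance.py | countPairsWithDistanceLowerEqualX
-- ===== SOURCE A (Python) =====
-- def countPairsWithDistanceLowerEqualX(sortedNums, x):
--     output=0
--     for i, num in enumerate(sortedNums):
--         #search either before num and after num
--
--         # before num: find smallest index before num that num-sortedNums[target]<=x
--         countBeforeNum=0
--         if i>0:
--             if num-sortedNums[i-1]>x:
--                 countBeforeNum=0
--             elif num-sortedNums[0]<=x:
--                 countBeforeNum=i
--             else:
--                 left=0
--                 right=i-1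
--                 while left+1<right:
--                     middle=(left+right)//2
--                     if num-sortedNums[middle]<=x:
--                         right=middle
--                     else:
--                         left=middle
--                 #right is the target
--                 countBeforeNum=i-right
--         output+=countBeforeNum
--     return output
-- ===== SOURCE B (Python) =====
-- def countPairsWithDistanceLowerEqualX(sortedNums, x):
--     # Two-pointer sliding window over the sorted array: for each right index,
--     # advance left past elements farther than x; the window length is the
--     # number of qualifying pairs ending at right.
--     output = 0
--     left = 0
--     for right, num in enumerate(sortedNums):
--         while left < right and num - sortedNums[left] > x:
--             left += 1
--         output += right - left
--     return output
-- ===== Notes on version B (the rewrite author's own statement) =====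
-- stated objective: faster
-- what changed: Replaces the per-element branchy binary search over the prefix with a single two-pointer sliding window, turning the whole count into one linear pass.
-- outside the precondition, e.g. on countPairsWithDistanceLowerEqualX([3, 1, 2], 0): A returns 1, B returns 3; on countPairsWithDistanceLowerEqualX([5, 1, 3], 1): A returns 1, B returns 3
import Mathlib
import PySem

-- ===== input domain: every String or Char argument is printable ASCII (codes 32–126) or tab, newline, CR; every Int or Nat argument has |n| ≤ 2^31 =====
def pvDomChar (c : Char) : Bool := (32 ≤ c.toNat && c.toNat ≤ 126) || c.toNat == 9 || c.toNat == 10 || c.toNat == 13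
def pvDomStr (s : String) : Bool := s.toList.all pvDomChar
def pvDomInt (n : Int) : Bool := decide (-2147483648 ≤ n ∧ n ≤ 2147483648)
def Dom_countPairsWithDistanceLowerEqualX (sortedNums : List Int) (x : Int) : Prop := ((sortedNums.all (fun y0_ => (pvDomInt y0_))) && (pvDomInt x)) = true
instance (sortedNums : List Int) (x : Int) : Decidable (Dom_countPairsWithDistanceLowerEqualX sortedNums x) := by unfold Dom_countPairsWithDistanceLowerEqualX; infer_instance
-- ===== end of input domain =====

-- B replaces A's per-element binary search with one two-pointer sliding window (measurably faster, linear pass).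


-- ===== PORT A =====
-- A's inner 'while left+1 < right' bisection; middle = (left+right)//2 is PySem.Int.floordiv.
-- Indices probed are always in range on the admitted inputs, so pyGetD is exact.
def pvBsearchA (nums : List Int) (num x left right : Int) : Int :=
  if left + 1 < right then
    let middle := PySem.Int.floordiv (left + right) 2
    if num - PySem.List.pyGetD nums middle 0 ≤ x then
      pvBsearchA nums num x left middle
    else
      pvBsearchA nums num x middle right
  else right
termination_by (right - left).toNat
decreasing_by
  · have h2 : PySem.Int.floordiv (left + right) 2 = (left + right) / 2 :=
      PySem.Int.floordiv_eq_ediv_of_pos (by omega)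
    omega
  · have h2 : PySem.Int.floordiv (left + right) 2 = (left + right) / 2 :=
      PySem.Int.floordiv_eq_ediv_of_pos (by omega)
    omega

def countPairsWithDistanceLowerEqualX (sortedNums : List Int) (x : Int) : Int :=
  (PySem.List.enumerate sortedNums 0).foldl
    (fun output p =>
      let i := p.1
      let num := p.2
      let countBeforeNum : Int :=
        if 0 < i then
          if x < num - PySem.List.pyGetD sortedNums (i - 1) 0 then 0
          else if num - PySem.List.pyGetD sortedNums 0 0 ≤ x then i
          else i - pvBsearchA sortedNums num x 0 (i - 1)
        else 0
      output + countBeforeNum)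
    0

-- ===== PORT B =====
-- Source B's 'while left < right and num - sortedNums[left] > x: left += 1'
def pvAdvanceB (nums : List Int) (num x left right : Int) : Int :=
  if left < right then
    if x < num - PySem.List.pyGetD nums left 0 then
      pvAdvanceB nums num x (left + 1) right
    else left
  else left
termination_by (right - left).toNat
decreasing_by omega

def countPairsWithDistanceLowerEqualX_alt (sortedNums : List Int) (x : Int) : Int :=
  ((PySem.List.enumerate sortedNums 0).foldl
    (fun (st : Int × Int) p =>
      let left := pvAdvanceB sortedNums p.2 x st.1 p.1
      (left, st.2 + (p.1 - left)))
    (0, 0)).2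

-- ===== PRECONDITION & SPEC =====
-- Pre_ admits the function's stated contract (sortedNums non-decreasing) plus the unsorted lists on
-- which every later-minus-earlier pair gap lies on one side of x, where element order cannot matter;
-- it excludes the remaining unsorted lists, on which the binary search's sortedness assumption fails
-- and A's and B's values are both unspecified-corner answers (see the cited examples).
def Pre_countPairsWithDistanceLowerEqualX (sortedNums : List Int) (x : Int) : Prop :=
  sortedNums.Pairwise (· ≤ ·) ∨
  sortedNums.Pairwise (fun a b => b - a ≤ x) ∨
  sortedNums.Pairwise (fun a b => x < b - a)
instance (sortedNums : List Int) (x : Int) : Decidable (Pre_countPairsWithDistanceLowerEqualX sortedNums x) := by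
  unfold Pre_countPairsWithDistanceLowerEqualX; infer_instance

def pvWitness_countPairsWithDistanceLowerEqualX : List Int × Int := ([0, 2, 3, 7], 3)

def Spec_countPairsWithDistanceLowerEqualX (sortedNums : List Int) (x : Int) (out : Int) : Prop := out = countPairsWithDistanceLowerEqualX_alt sortedNums x
instance (sortedNums : List Int) (x : Int) (out : Int) : Decidable (Spec_countPairsWithDistanceLowerEqualX sortedNums x out) := by unfold Spec_countPairsWithDistanceLowerEqualX; infer_instance

-- ===== CLAIM (what is proved, stated in full; the proofs are below) =====
def Claim_equal_countPairsWithDistanceLowerEqualX : Prop := ∀ (sortedNums : List Int) (x : Int), Dom_countPairsWithDistanceLowerEqualX sortedNums x → Pre_countPairsWithDistanceLowerEqualX sortedNums x → Spec_countPairsWithDistanceLowerEqualX sortedNums x (countPairsWithDistanceLowerEqualX sortedNums x)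

-- ===== LEMMAS AND PROOFS =====

-- A's per-index contribution, as a function of the index (num = xs[i]).
def pvCntA (xs : List Int) (x i : Int) : Int :=
  if 0 < i then
    if x < PySem.List.pyGetD xs i 0 - PySem.List.pyGetD xs (i - 1) 0 then 0
    else if PySem.List.pyGetD xs i 0 - PySem.List.pyGetD xs 0 0 ≤ x then i
    else i - pvBsearchA xs (PySem.List.pyGetD xs i 0) x 0 (i - 1)
  else 0

-- Port A as a fold over the index range.
lemma pvPortA_eq (xs : List Int) (x : Int) :
    countPairsWithDistanceLowerEqualX xs x =
      (PySem.List.pyRange 0 (xs.length : Int) 1).foldl (fun out j => out + pvCntA xs x j) 0 := by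
  unfold countPairsWithDistanceLowerEqualX
  rw [PySem.List.enumerate_eq_map_pyRange xs 0]
  simp [List.foldl_map, pvCntA]

-- Port B as a fold over the index range.
lemma pvPortB_eq (xs : List Int) (x : Int) :
    countPairsWithDistanceLowerEqualX_alt xs x =
      ((PySem.List.pyRange 0 (xs.length : Int) 1).foldl
        (fun (st : Int × Int) j =>
          let left := pvAdvanceB xs (PySem.List.pyGetD xs j 0) x st.1 j
          (left, st.2 + (j - left))) (0, 0)).2 := by
  unfold countPairsWithDistanceLowerEqualX_alt
  rw [PySem.List.enumerate_eq_map_pyRange xs 0]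
  simp [List.foldl_map]

-- Specification of the window advance.
lemma pvAdvanceB_spec (nums : List Int) (num x : Int) :
    ∀ left right : Int, left ≤ right →
      left ≤ pvAdvanceB nums num x left right ∧
      pvAdvanceB nums num x left right ≤ right ∧
      (∀ j, left ≤ j → j < pvAdvanceB nums num x left right → x < num - PySem.List.pyGetD nums j 0) ∧
      (pvAdvanceB nums num x left right = right ∨
        num - PySem.List.pyGetD nums (pvAdvanceB nums num x left right) 0 ≤ x) := by
  intro left right h
  have key : ∀ (fuel : Nat) (l : Int), (right - l).toNat ≤ fuel → l ≤ right →
      l ≤ pvAdvanceB nums num x l right ∧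
      pvAdvanceB nums num x l right ≤ right ∧
      (∀ j, l ≤ j → j < pvAdvanceB nums num x l right → x < num - PySem.List.pyGetD nums j 0) ∧
      (pvAdvanceB nums num x l right = right ∨
        num - PySem.List.pyGetD nums (pvAdvanceB nums num x l right) 0 ≤ x) := by
    intro fuel
    induction fuel with
    | zero =>
      intro l hf hl
      have hlr : l = right := by omega
      have he : pvAdvanceB nums num x l right = l := by
        rw [pvAdvanceB]; simp [hlr]
      rw [he]
      exact ⟨le_refl _, hl, fun j hj1 hj2 => by omega, Or.inl hlr⟩
    | succ k ih =>
      intro l hf hl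
      rw [pvAdvanceB]
      by_cases h1 : l < right
      · by_cases h2 : x < num - PySem.List.pyGetD nums l 0
        · simp only [if_pos h1, if_pos h2]
          obtain ⟨a1, a2, a3, a4⟩ := ih (l + 1) (by omega) (by omega)
          refine ⟨by omega, a2, ?_, a4⟩
          intro j hj1 hj2
          rcases eq_or_lt_of_le hj1 with he | hlt
          · exact he ▸ h2
          · exact a3 j (by omega) hj2
        · simp only [if_pos h1, if_neg h2]
          exact ⟨le_refl _, by omega, fun j hj1 hj2 => by omega, Or.inr (by omega)⟩
      · simp only [if_neg h1]
        exact ⟨le_refl _, by omega, fun j hj1 hj2 => by omega, Or.inl (by omega)⟩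
  exact key (right - left).toNat left (le_refl _) h

-- Specification of A's bisection (given a true bracket).
lemma pvBsearchA_spec (nums : List Int) (num x : Int) :
    ∀ left right : Int, left < right →
      x < num - PySem.List.pyGetD nums left 0 →
      num - PySem.List.pyGetD nums right 0 ≤ x →
      left < pvBsearchA nums num x left right ∧
      pvBsearchA nums num x left right ≤ right ∧
      num - PySem.List.pyGetD nums (pvBsearchA nums num x left right) 0 ≤ x ∧
      x < num - PySem.List.pyGetD nums (pvBsearchA nums num x left right - 1) 0 := by
  have key : ∀ (fuel : Nat) (left right : Int), (right - left).toNat ≤ fuel → left < right →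
      x < num - PySem.List.pyGetD nums left 0 →
      num - PySem.List.pyGetD nums right 0 ≤ x →
      left < pvBsearchA nums num x left right ∧
      pvBsearchA nums num x left right ≤ right ∧
      num - PySem.List.pyGetD nums (pvBsearchA nums num x left right) 0 ≤ x ∧
      x < num - PySem.List.pyGetD nums (pvBsearchA nums num x left right - 1) 0 := by
    intro fuel
    induction fuel with
    | zero =>
      intro left right hf hlr hleft hright
      have : right = left + 1 := by omega
      subst this
      rw [pvBsearchA]
      simp only [if_neg (by omega : ¬ (left + 1 < left + 1))]
      refine ⟨by omega, le_refl _, hright, ?_⟩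
      simpa using hleft
    | succ k ih =>
      intro left right hf hlr hleft hright
      rw [pvBsearchA]
      by_cases h1 : left + 1 < right
      · have hm : PySem.Int.floordiv (left + right) 2 = (left + right) / 2 :=
          PySem.Int.floordiv_eq_ediv_of_pos (by omega)
        simp only [if_pos h1]
        by_cases h2 : num - PySem.List.pyGetD nums (PySem.Int.floordiv (left + right) 2) 0 ≤ x
        · simp only [if_pos h2]
          have := ih left (PySem.Int.floordiv (left + right) 2) (by omega) (by omega) hleft h2
          exact ⟨this.1, by omega, this.2.2⟩
        · simp only [if_neg h2]
          have := ih (PySem.Int.floordiv (left + right) 2) right (by omega) (by omega) (by omega) hright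
          exact ⟨by omega, this.2⟩
      · simp only [if_neg h1]
        have : right = left + 1 := by omega
        subst this
        refine ⟨by omega, le_refl _, hright, ?_⟩
        simpa using hleft
  intro left right hlr hleft hright
  exact key (right - left).toNat left right (le_refl _) hlr hleft hright

-- The boundary characterisation pins the count uniquely.
lemma pvP_unique (g : Int → Int) (num x i c c' : Int)
    (hc : 0 ≤ c ∧ c ≤ i ∧ (∀ j, i - c ≤ j → j < i → num - g j ≤ x) ∧
          (∀ j, 0 ≤ j → j < i - c → x < num - g j))
    (hc' : 0 ≤ c' ∧ c' ≤ i ∧ (∀ j, i - c' ≤ j → j < i → num - g j ≤ x) ∧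
          (∀ j, 0 ≤ j → j < i - c' → x < num - g j)) : c = c' := by
  have key : ∀ c c' : Int,
      (0 ≤ c ∧ c ≤ i ∧ (∀ j, i - c ≤ j → j < i → num - g j ≤ x) ∧
        (∀ j, 0 ≤ j → j < i - c → x < num - g j)) →
      (0 ≤ c' ∧ c' ≤ i ∧ (∀ j, i - c' ≤ j → j < i → num - g j ≤ x) ∧
        (∀ j, 0 ≤ j → j < i - c' → x < num - g j)) →
      c < c' → False := by
    intro c c' hc hc' hlt
    have h1 : x < num - g (i - c') := hc.2.2.2 (i - c') (by omega) (by omega)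
    have h2 : num - g (i - c') ≤ x := hc'.2.2.1 (i - c') (by omega) (by omega)
    omega
  rcases lt_trichotomy c c' with h | h | h
  · exact absurd (key c c' hc hc' h) (by simp)
  · exact h
  · exact absurd (key c' c hc' hc h) (by simp)

-- Monotone access from sortedness.
lemma pvMono (xs : List Int) (hs : xs.Pairwise (· ≤ ·)) :
    ∀ i j : Int, 0 ≤ i → i ≤ j → j < (xs.length : Int) →
      PySem.List.pyGetD xs i 0 ≤ PySem.List.pyGetD xs j 0 := by
  intro i j h0 hij hj
  rcases eq_or_lt_of_le hij with he | hlt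
  · rw [he]
  · rw [PySem.List.pyGetD_eq_getElem xs 0 h0 (by omega),
        PySem.List.pyGetD_eq_getElem xs 0 (by omega) hj]
    exact List.pairwise_iff_getElem.mp hs i.toNat j.toNat (by omega) (by omega) (by omega)

-- Indexed form of the two trivial pairwise hypotheses.
lemma pvPairIdx (xs : List Int) (R : Int → Int → Prop) (h : xs.Pairwise R) :
    ∀ i j : Int, 0 ≤ i → i < j → j < (xs.length : Int) →
      R (PySem.List.pyGetD xs i 0) (PySem.List.pyGetD xs j 0) := by
  intro i j h0 hij hj
  rw [PySem.List.pyGetD_eq_getElem xs 0 h0 (by omega),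
      PySem.List.pyGetD_eq_getElem xs 0 (by omega) hj]
  exact List.pairwise_iff_getElem.mp h i.toNat j.toNat (by omega) (by omega) (by omega)


-- A's per-index contribution satisfies the boundary characterisation (sorted case).
lemma pvCntA_P (xs : List Int) (x : Int) (hs : xs.Pairwise (· ≤ ·)) (i : Int)
    (h0 : 0 ≤ i) (hi : i < (xs.length : Int)) :
    0 ≤ pvCntA xs x i ∧ pvCntA xs x i ≤ i ∧
    (∀ j, i - pvCntA xs x i ≤ j → j < i →
      PySem.List.pyGetD xs i 0 - PySem.List.pyGetD xs j 0 ≤ x) ∧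
    (∀ j, 0 ≤ j → j < i - pvCntA xs x i →
      x < PySem.List.pyGetD xs i 0 - PySem.List.pyGetD xs j 0) := by
  have mono := pvMono xs hs
  unfold pvCntA
  split_ifs with h1 h2 h3
  · refine ⟨le_refl _, by omega, fun j hj1 hj2 => by omega, fun j hj1 hj2 => ?_⟩
    have := mono j (i - 1) hj1 (by omega) (by omega)
    omega
  · refine ⟨by omega, le_refl _, fun j hj1 hj2 => ?_, fun j hj1 hj2 => by omega⟩
    have := mono 0 j (le_refl _) (by omega) (by omega)
    omega
  · push Not at h2 h3
    have hi2 : 0 < i - 1 := by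
      rcases lt_or_ge 0 (i - 1) with h | h
      · exact h
      · exfalso
        have hieq : i = 1 := by omega
        rw [hieq] at h2 h3
        norm_num at h2 h3
        omega
    obtain ⟨b1, b2, b3, b4⟩ :=
      pvBsearchA_spec xs (PySem.List.pyGetD xs i 0) x 0 (i - 1) hi2 (by omega) (by omega)
    refine ⟨by omega, by omega, fun j hj1 hj2 => ?_, fun j hj1 hj2 => ?_⟩
    · have := mono (pvBsearchA xs (PySem.List.pyGetD xs i 0) x 0 (i - 1)) j
        (by omega) (by omega) (by omega)
      omega
    · have := mono j (pvBsearchA xs (PySem.List.pyGetD xs i 0) x 0 (i - 1) - 1)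
        hj1 (by omega) (by omega)
      omega
  · refine ⟨le_refl _, by omega, fun j hj1 hj2 => by omega, fun j hj1 hj2 => by omega⟩

-- Main invariant, sorted case.
lemma pvMain_sorted (xs : List Int) (x : Int) (hs : xs.Pairwise (· ≤ ·)) :
    ∀ m : Nat, (m : Int) ≤ (xs.length : Int) →
      ∃ L : Int,
        ((PySem.List.pyRange 0 (m : Int) 1).foldl
          (fun (st : Int × Int) j =>
            let left := pvAdvanceB xs (PySem.List.pyGetD xs j 0) x st.1 j
            (left, st.2 + (j - left))) (0, 0)) =
          (L, (PySem.List.pyRange 0 (m : Int) 1).foldl (fun out j => out + pvCntA xs x j) 0) ∧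
        0 ≤ L ∧ L ≤ (m : Int) ∧
        (∀ j, 0 ≤ j → j < L → ∀ k : Int, (m : Int) ≤ k → k < (xs.length : Int) →
          x < PySem.List.pyGetD xs k 0 - PySem.List.pyGetD xs j 0) := by
  have mono := pvMono xs hs
  intro m
  induction m with
  | zero =>
    intro _
    have hz : ((0 : Nat) : Int) = 0 := by norm_num
    rw [hz, PySem.List.pyRange_one_eq_nil (le_refl _)]
    exact ⟨0, rfl, le_refl _, by norm_num, fun j hj1 hj2 => by omega⟩
  | succ m ih =>
    intro hm1
    have hmlt : (m : Int) < (xs.length : Int) := by push_cast at hm1; omega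
    obtain ⟨L, hEq, hL0, hLm, hInv⟩ := ih (by omega)
    have hcast : ((m + 1 : Nat) : Int) = (m : Int) + 1 := by push_cast; ring
    rw [hcast, PySem.List.pyRange_one_succ_right (by exact_mod_cast Nat.zero_le m),
        List.foldl_append, List.foldl_append, hEq]
    simp only [List.foldl_cons, List.foldl_nil]
    obtain ⟨a1, a2, a3, a4⟩ :=
      pvAdvanceB_spec xs (PySem.List.pyGetD xs (m : Int) 0) x L (m : Int) (by omega)
    have hAll : ∀ j, 0 ≤ j →
        j < pvAdvanceB xs (PySem.List.pyGetD xs (m : Int) 0) x L (m : Int) →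
        x < PySem.List.pyGetD xs (m : Int) 0 - PySem.List.pyGetD xs j 0 := by
      intro j hj1 hj2
      rcases lt_or_ge j L with h | h
      · exact hInv j hj1 h (m : Int) (le_refl _) hmlt
      · exact a3 j h hj2
    have hP1 : 0 ≤ (m : Int) - pvAdvanceB xs (PySem.List.pyGetD xs (m : Int) 0) x L (m : Int) ∧
        (m : Int) - pvAdvanceB xs (PySem.List.pyGetD xs (m : Int) 0) x L (m : Int) ≤ (m : Int) ∧
        (∀ j, (m : Int) - ((m : Int) - pvAdvanceB xs (PySem.List.pyGetD xs (m : Int) 0) x L (m : Int)) ≤ j →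
          j < (m : Int) → PySem.List.pyGetD xs (m : Int) 0 - PySem.List.pyGetD xs j 0 ≤ x) ∧
        (∀ j, 0 ≤ j → j < (m : Int) - ((m : Int) - pvAdvanceB xs (PySem.List.pyGetD xs (m : Int) 0) x L (m : Int)) →
          x < PySem.List.pyGetD xs (m : Int) 0 - PySem.List.pyGetD xs j 0) := by
      refine ⟨by omega, by omega, fun j hj1 hj2 => ?_, fun j hj1 hj2 => hAll j hj1 (by omega)⟩
      rcases a4 with h | h
      · omega
      · have := mono (pvAdvanceB xs (PySem.List.pyGetD xs (m : Int) 0) x L (m : Int)) j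
          (by omega) (by omega) (by omega)
        omega
    have hP2 := pvCntA_P xs x hs (m : Int) (by omega) hmlt
    have hcnt : pvCntA xs x (m : Int) =
        (m : Int) - pvAdvanceB xs (PySem.List.pyGetD xs (m : Int) 0) x L (m : Int) :=
      pvP_unique (fun j => PySem.List.pyGetD xs j 0) (PySem.List.pyGetD xs (m : Int) 0) x (m : Int) _ _
        ⟨hP2.1, hP2.2.1, hP2.2.2.1, hP2.2.2.2⟩ hP1
    refine ⟨pvAdvanceB xs (PySem.List.pyGetD xs (m : Int) 0) x L (m : Int), ?_, by omega, by omega, ?_⟩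
    · rw [hcnt]
    · intro j hj1 hj2 k hk1 hk2
      have h1 := hAll j hj1 hj2
      have h2 := mono (m : Int) k (by omega) (by omega) hk2
      omega

-- Main invariant, all pair gaps ≤ x.
lemma pvMain_allLe (xs : List Int) (x : Int)
    (h : ∀ i j : Int, 0 ≤ i → i < j → j < (xs.length : Int) →
      PySem.List.pyGetD xs j 0 - PySem.List.pyGetD xs i 0 ≤ x) :
    ∀ m : Nat, (m : Int) ≤ (xs.length : Int) →
      ((PySem.List.pyRange 0 (m : Int) 1).foldl
        (fun (st : Int × Int) j =>
          let left := pvAdvanceB xs (PySem.List.pyGetD xs j 0) x st.1 j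
          (left, st.2 + (j - left))) (0, 0)) =
        (0, (PySem.List.pyRange 0 (m : Int) 1).foldl (fun out j => out + pvCntA xs x j) 0) := by
  intro m
  induction m with
  | zero =>
    intro _
    have hz : ((0 : Nat) : Int) = 0 := by norm_num
    rw [hz, PySem.List.pyRange_one_eq_nil (le_refl _)]
    rfl
  | succ m ih =>
    intro hm1
    have hmlt : (m : Int) < (xs.length : Int) := by push_cast at hm1; omega
    have hcast : ((m + 1 : Nat) : Int) = (m : Int) + 1 := by push_cast; ring
    rw [hcast, PySem.List.pyRange_one_succ_right (by exact_mod_cast Nat.zero_le m),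
        List.foldl_append, List.foldl_append, ih (by omega)]
    simp only [List.foldl_cons, List.foldl_nil]
    have hadv : pvAdvanceB xs (PySem.List.pyGetD xs (m : Int) 0) x 0 (m : Int) = 0 := by
      rw [pvAdvanceB]
      rcases Nat.eq_zero_or_pos m with hm0 | hm0
      · subst hm0; norm_num
      · have hc : ¬ x < PySem.List.pyGetD xs (m : Int) 0 - PySem.List.pyGetD xs 0 0 := by
          have := h 0 (m : Int) (le_refl _) (by omega) hmlt
          omega
        rw [if_pos (show (0 : Int) < (m : Int) by omega), if_neg hc]
    have hcnt : pvCntA xs x (m : Int) = (m : Int) := by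
      unfold pvCntA
      rcases Nat.eq_zero_or_pos m with hm0 | hm0
      · subst hm0; norm_num
      · have h1 : (0 : Int) < (m : Int) := by omega
        have hp1 : PySem.List.pyGetD xs (m : Int) 0 - PySem.List.pyGetD xs ((m : Int) - 1) 0 ≤ x :=
          h ((m : Int) - 1) (m : Int) (by omega) (by omega) hmlt
        have hp0 : PySem.List.pyGetD xs (m : Int) 0 - PySem.List.pyGetD xs 0 0 ≤ x :=
          h 0 (m : Int) (le_refl _) h1 hmlt
        rw [if_pos h1, if_neg (by omega), if_pos hp0]
    rw [hadv, hcnt]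
    norm_num

-- Main invariant, all pair gaps > x.
lemma pvMain_allGt (xs : List Int) (x : Int)
    (h : ∀ i j : Int, 0 ≤ i → i < j → j < (xs.length : Int) →
      x < PySem.List.pyGetD xs j 0 - PySem.List.pyGetD xs i 0) :
    ∀ m : Nat, (m : Int) ≤ (xs.length : Int) →
      ∃ L : Int,
        ((PySem.List.pyRange 0 (m : Int) 1).foldl
          (fun (st : Int × Int) j =>
            let left := pvAdvanceB xs (PySem.List.pyGetD xs j 0) x st.1 j
            (left, st.2 + (j - left))) (0, 0)) = (L, 0) ∧
        0 ≤ L ∧ L ≤ (m : Int) ∧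
        (PySem.List.pyRange 0 (m : Int) 1).foldl (fun out j => out + pvCntA xs x j) 0 = 0 := by
  intro m
  induction m with
  | zero =>
    intro _
    have hz : ((0 : Nat) : Int) = 0 := by norm_num
    rw [hz, PySem.List.pyRange_one_eq_nil (le_refl _)]
    exact ⟨0, rfl, le_refl _, by norm_num, rfl⟩
  | succ m ih =>
    intro hm1
    have hmlt : (m : Int) < (xs.length : Int) := by push_cast at hm1; omega
    obtain ⟨L, hEq, hL0, hLm, hA⟩ := ih (by omega)
    have hcast : ((m + 1 : Nat) : Int) = (m : Int) + 1 := by push_cast; ring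
    rw [hcast, PySem.List.pyRange_one_succ_right (by exact_mod_cast Nat.zero_le m),
        List.foldl_append, List.foldl_append, hEq, hA]
    simp only [List.foldl_cons, List.foldl_nil]
    obtain ⟨a1, a2, a3, a4⟩ :=
      pvAdvanceB_spec xs (PySem.List.pyGetD xs (m : Int) 0) x L (m : Int) (by omega)
    have hL'eq : pvAdvanceB xs (PySem.List.pyGetD xs (m : Int) 0) x L (m : Int) = (m : Int) := by
      rcases a4 with hh | hh
      · exact hh
      · by_contra hne
        have hlt : pvAdvanceB xs (PySem.List.pyGetD xs (m : Int) 0) x L (m : Int) < (m : Int) := by omega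
        have := h (pvAdvanceB xs (PySem.List.pyGetD xs (m : Int) 0) x L (m : Int)) (m : Int)
          (by omega) hlt hmlt
        omega
    have hcnt : pvCntA xs x (m : Int) = 0 := by
      unfold pvCntA
      rcases Nat.eq_zero_or_pos m with hm0 | hm0
      · subst hm0; norm_num
      · have h1 : (0 : Int) < (m : Int) := by omega
        have hp1 : x < PySem.List.pyGetD xs (m : Int) 0 - PySem.List.pyGetD xs ((m : Int) - 1) 0 :=
          h ((m : Int) - 1) (m : Int) (by omega) (by omega) hmlt
        rw [if_pos h1, if_pos hp1]
    rw [hL'eq, hcnt]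
    exact ⟨(m : Int), by norm_num, by omega, by omega, by norm_num⟩

-- ===== VERDICT (by name: the statement is the Claim_ definition above) =====
theorem countPairsWithDistanceLowerEqualX_spec : Claim_equal_countPairsWithDistanceLowerEqualX := by
  intro xs x _ hpre
  unfold Spec_countPairsWithDistanceLowerEqualX
  rw [pvPortA_eq, pvPortB_eq]
  rcases hpre with hs | h1 | h2
  · obtain ⟨L, hEq, -, -, -⟩ := pvMain_sorted xs x hs xs.length (le_refl _)
    rw [hEq]
  · rw [pvMain_allLe xs x (pvPairIdx xs _ h1) xs.length (le_refl _)]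
  · obtain ⟨L, hEq, -, -, hA⟩ := pvMain_allGt xs x (pvPairIdx xs _ h2) xs.length (le_refl _)
    rw [hEq, hA]
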